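-- pv_equiv track=rewrite | github.com/Terence-hash/SplicePred | Source/signals_processing.py | extract_bgd_signals
-- ===== SOURCE A (Python) =====
-- bases = {'a': 0, 'g': 1, 'c': 2, 't': 3}
--
-- def check_signal(signal, signal_len):
--     """
--     检查信号
--     """
--     # 排除长度异常信号
--     if len(signal) != signal_len:
--         return False
--     # 排除非常见碱基
--     for base in signal:
--         if base not in bases.keys():
--             return False
--     return True
--
-- def extract_bgd_signals(whole_seq, signal_ulen, signal_dlen, site_type, target_signals=None, excluding=True):
--     """
--     提取背景信号
--     """
--     if target_signals is None:
--         target_signals = []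
--     bgd_signals = []
--     signal_len = signal_ulen + signal_dlen
--     for i in range(len(whole_seq) - signal_len + 1):
--         slide = whole_seq[i: i + signal_len].lower()
--         if slide in target_signals:
--             continue
--         if site_type == "donor":
--             # 对于donor，排除非GT中心背景信号
--             if excluding and slide[signal_ulen: signal_ulen + 2] != "gt":
--                 continue
--         else:
--             # 对于acceptor，排除非AG中心背景信号
--             if excluding and slide[signal_ulen - 2: signal_ulen] != "ag":
--                 continue
--         if check_signal(slide, signal_len):
--             bgd_signals.append(slide)
--
--     return bgd_signals
-- ===== SOURCE B (Python) =====
-- bases = {'a': 0, 'g': 1, 'c': 2, 't': 3}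
--
-- def extract_bgd_signals(whole_seq, signal_ulen, signal_dlen, site_type, target_signals=None, excluding=True):
--     signal_len = signal_ulen + signal_dlen
--     if signal_len < 0:
--         return []
--     targets = set(target_signals) if target_signals is not None else set()
--     seq = whole_seq.lower()
--     # prefix counts of non-acgt bases: bad[k] = invalid bases among seq[:k]
--     bad = [0]
--     for c in seq:
--         bad.append(bad[-1] + (c not in bases))
--     motif = "gt" if site_type == "donor" else "ag"
--     out = []
--     for i in range(len(seq) - signal_len + 1):
--         slide = seq[i:i + signal_len]
--         if slide in targets:
--             continue
--         if excluding:
--             center = (slide[signal_ulen:signal_ulen + 2] if site_type == "donor"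
--                       else slide[signal_ulen - 2:signal_ulen])
--             if center != motif:
--                 continue
--         if bad[i + signal_len] == bad[i]:
--             out.append(slide)
--     return out
-- ===== Notes on version B (the rewrite author's own statement) =====
-- stated objective: alternative
-- what changed: B lowercases the whole sequence once instead of per window, replaces the per-window check_signal base scan by a prefix-sum table of invalid bases built in one pass (so the inner validity loop disappears), and keeps target signals in a set.
import Mathlib
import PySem

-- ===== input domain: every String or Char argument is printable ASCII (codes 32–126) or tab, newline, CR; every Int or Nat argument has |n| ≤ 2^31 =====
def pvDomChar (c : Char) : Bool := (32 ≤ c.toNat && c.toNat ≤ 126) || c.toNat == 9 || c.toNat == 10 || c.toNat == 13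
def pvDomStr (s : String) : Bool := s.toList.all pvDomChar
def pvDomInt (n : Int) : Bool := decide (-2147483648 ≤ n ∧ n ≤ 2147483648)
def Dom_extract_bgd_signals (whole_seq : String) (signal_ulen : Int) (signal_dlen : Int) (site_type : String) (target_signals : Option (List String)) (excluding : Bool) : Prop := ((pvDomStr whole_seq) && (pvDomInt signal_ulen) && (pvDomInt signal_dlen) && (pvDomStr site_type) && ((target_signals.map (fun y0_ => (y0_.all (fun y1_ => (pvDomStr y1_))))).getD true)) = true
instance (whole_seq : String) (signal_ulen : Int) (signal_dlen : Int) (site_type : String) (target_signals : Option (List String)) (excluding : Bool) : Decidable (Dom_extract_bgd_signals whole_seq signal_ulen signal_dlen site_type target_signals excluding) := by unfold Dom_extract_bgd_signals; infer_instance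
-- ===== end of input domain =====

-- B lowercases the sequence once, replaces the per-window base-validity scan by a prefix-sum
-- table of invalid bases, and keeps target signals in a set (objective: alternative algorithm).

-- ===== PORT A =====
-- module constant `bases` (only its keys are ever used)
def pvBasesDict : PySem.Dict Char Int := PySem.Dict.ofList [('a', 0), ('g', 1), ('c', 2), ('t', 3)]

-- helper check_signal: length test, then the early-return loop over the bases
def check_signal (signal : String) (signal_len : Int) : Bool :=
  if PySem.Str.len signal ≠ signal_len then false
  else signal.toList.all (fun base => pvBasesDict.contains base)

def extract_bgd_signals (whole_seq : String) (signal_ulen : Int) (signal_dlen : Int) (site_type : String) (target_signals : Option (List String)) (excluding : Bool) : List String :=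
  let tsigs := target_signals.getD []
  let signal_len := signal_ulen + signal_dlen
  (PySem.List.pyRange 0 (PySem.Str.len whole_seq - signal_len + 1) 1).foldl
    (fun bgd_signals i =>
      let slideL := PySem.Chars.lower (PySem.List.slice whole_seq.toList (some i) (some (i + signal_len)))
      let slide := String.ofList slideL
      if tsigs.contains slide then bgd_signals
      else if site_type = "donor" then
        if excluding && !(PySem.List.slice slideL (some signal_ulen) (some (signal_ulen + 2)) == ['g', 't']) then bgd_signals
        else if check_signal slide signal_len then bgd_signals ++ [slide] else bgd_signals
      else
        if excluding && !(PySem.List.slice slideL (some (signal_ulen - 2)) (some signal_ulen) == ['a', 'g']) then bgd_signals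
        else if check_signal slide signal_len then bgd_signals ++ [slide] else bgd_signals)
    []

-- ===== PORT B =====
def extract_bgd_signals_alt (whole_seq : String) (signal_ulen : Int) (signal_dlen : Int) (site_type : String) (target_signals : Option (List String)) (excluding : Bool) : List String :=
  let signal_len := signal_ulen + signal_dlen
  if signal_len < 0 then []
  else
    let targets : PySem.Set String := PySem.Set.ofList (target_signals.getD [])
    let seq := PySem.Chars.lower whole_seq.toList
    -- prefix counts of invalid bases: bad[k] = invalid bases among seq[:k] (running last value carried)
    let bad := (seq.foldl
      (fun (p : List Nat × Nat) c =>
        let v := p.2 + (if pvBasesDict.contains c then 0 else 1)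
        (p.1 ++ [v], v)) ([0], 0)).1
    let motif : List Char := if site_type = "donor" then ['g', 't'] else ['a', 'g']
    (PySem.List.pyRange 0 ((seq.length : Int) - signal_len + 1) 1).foldl
      (fun out i =>
        let slideL := PySem.List.slice seq (some i) (some (i + signal_len))
        let slide := String.ofList slideL
        if targets.contains slide then out
        else if excluding &&
            !((if site_type = "donor" then PySem.List.slice slideL (some signal_ulen) (some (signal_ulen + 2))
               else PySem.List.slice slideL (some (signal_ulen - 2)) (some signal_ulen)) == motif) then out
        else if PySem.List.pyGetD bad (i + signal_len) 0 == PySem.List.pyGetD bad i 0 then out ++ [slide]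
        else out)
      []

-- ===== PRECONDITION & SPEC =====
def Spec_extract_bgd_signals (whole_seq : String) (signal_ulen : Int) (signal_dlen : Int) (site_type : String) (target_signals : Option (List String)) (excluding : Bool) (out : List String) : Prop := out = extract_bgd_signals_alt whole_seq signal_ulen signal_dlen site_type target_signals excluding
instance (whole_seq : String) (signal_ulen : Int) (signal_dlen : Int) (site_type : String) (target_signals : Option (List String)) (excluding : Bool) (out : List String) : Decidable (Spec_extract_bgd_signals whole_seq signal_ulen signal_dlen site_type target_signals excluding out) := by unfold Spec_extract_bgd_signals; infer_instance

-- ===== CLAIM (what is proved, stated in full; the proofs are below) =====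
def Claim_equal_extract_bgd_signals : Prop := ∀ (whole_seq : String) (signal_ulen : Int) (signal_dlen : Int) (site_type : String) (target_signals : Option (List String)) (excluding : Bool), Dom_extract_bgd_signals whole_seq signal_ulen signal_dlen site_type target_signals excluding → Spec_extract_bgd_signals whole_seq signal_ulen signal_dlen site_type target_signals excluding (extract_bgd_signals whole_seq signal_ulen signal_dlen site_type target_signals excluding)

-- ===== LEMMAS AND PROOFS =====

-- the invalid-base predicate B's prefix table counts
def pvInvalid (c : Char) : Bool := !pvBasesDict.contains c

lemma check_signal_of_neg (s : String) (L : Int) (h : L < 0) : check_signal s L = false := by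
  unfold check_signal
  rw [if_pos]
  rw [PySem.Str.len_eq]
  omega

-- B's fold builds exactly the list of prefix counts of invalid bases
lemma bad_fold_spec (cs : List Char) :
    cs.foldl (fun (p : List Nat × Nat) c =>
        let v := p.2 + (if pvBasesDict.contains c then 0 else 1)
        (p.1 ++ [v], v)) ([0], 0)
      = ((List.range (cs.length + 1)).map (fun k => (cs.take k).countP pvInvalid),
         cs.countP pvInvalid) := by
  induction cs using List.reverseRecOn with
  | nil => simp
  | append_singleton cs c ih =>
    rw [List.foldl_append, ih]
    simp only [List.foldl_cons, List.foldl_nil, List.length_append, List.length_singleton]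
    rw [Prod.mk.injEq]
    refine ⟨?_, ?_⟩
    · conv_rhs => rw [List.range_succ]
      rw [List.map_append]
      congr 1
      · refine List.map_congr_left ?_
        intro k hk
        rw [List.take_append_of_le_length (Nat.lt_succ_iff.mp (List.mem_range.mp hk))]
      · simp only [List.map_cons, List.map_nil]
        rw [List.take_of_length_le (by simp), List.countP_append]
        by_cases h : pvBasesDict.contains c <;> simp [pvInvalid, h]
    · rw [List.countP_append]
      by_cases h : pvBasesDict.contains c <;> simp [pvInvalid, h]

lemma bad_getD (cs : List Char) (j : Int) (h0 : 0 ≤ j) (hk : j.toNat ≤ cs.length) :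
    PySem.List.pyGetD ((cs.foldl (fun (p : List Nat × Nat) c =>
        let v := p.2 + (if pvBasesDict.contains c then 0 else 1)
        (p.1 ++ [v], v)) ([0], 0)).1) j 0 = (cs.take j.toNat).countP pvInvalid := by
  rw [bad_fold_spec]
  rw [PySem.List.pyGetD_of_nonneg _ _ h0]
  rw [List.getD_eq_getElem?_getD]
  rw [List.getElem?_map]
  rw [List.getElem?_range (by omega)]
  rfl

-- lower commutes with the window slice (both bounds nonnegative)
lemma lower_slice_comm (xs : List Char) (a b : Int) (ha : 0 ≤ a) (hb : 0 ≤ b) :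
    PySem.Chars.lower (PySem.List.slice xs (some a) (some b))
      = PySem.List.slice (PySem.Chars.lower xs) (some a) (some b) := by
  rw [PySem.List.slice_toNat xs ha hb, PySem.List.slice_toNat _ ha hb]
  simp [PySem.Chars.lower, List.map_take, List.map_drop]

lemma set_ofList_contains (xs : List String) (y : String) :
    (PySem.Set.ofList xs).contains y = xs.contains y := by
  by_cases h : y ∈ xs <;> simp [PySem.Set.mem_ofList, h]

-- the validity test: check_signal on a full-length window ↔ the prefix counts agree
lemma check_eq_bad (seq : List Char) (i L : Int) (hi : 0 ≤ i) (hL : 0 ≤ L)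
    (hiL : i + L ≤ (seq.length : Int)) :
    check_signal (String.ofList (PySem.List.slice seq (some i) (some (i + L)))) L
      = (PySem.List.pyGetD ((seq.foldl (fun (p : List Nat × Nat) c =>
            let v := p.2 + (if pvBasesDict.contains c then 0 else 1)
            (p.1 ++ [v], v)) ([0], 0)).1) (i + L) 0
         == PySem.List.pyGetD ((seq.foldl (fun (p : List Nat × Nat) c =>
            let v := p.2 + (if pvBasesDict.contains c then 0 else 1)
            (p.1 ++ [v], v)) ([0], 0)).1) i 0) := by
  rw [bad_getD seq (i + L) (by omega) (by omega), bad_getD seq i hi (by omega)]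
  have hsum : (i + L).toNat = i.toNat + L.toNat := by omega
  rw [hsum]
  have hslice : PySem.List.slice seq (some i) (some (i + L))
      = (seq.drop i.toNat).take L.toNat := by
    rw [PySem.List.slice_toNat seq hi (by omega)]
    congr 1
    omega
  have hwlen : ((seq.drop i.toNat).take L.toNat).length = L.toNat := by
    simp
    omega
  rw [List.take_add]
  rw [List.countP_append]
  unfold check_signal
  rw [if_neg]
  · rw [hslice]
    rcases Bool.eq_false_or_eq_true (((seq.drop i.toNat).take L.toNat).all (fun base => pvBasesDict.contains base)) with hall | hall
    · -- every base valid: the counts agree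
      rw [String.toList_ofList, hall]
      have hz : ((seq.drop i.toNat).take L.toNat).countP pvInvalid = 0 := by
        rw [List.countP_eq_zero]
        intro a ha
        rw [List.all_eq_true] at hall
        simp [pvInvalid, hall a ha]
      symm
      simp only [beq_iff_eq]
      omega
    · -- some invalid base in the window: the counts differ
      rw [String.toList_ofList, hall]
      rw [List.all_eq_false] at hall
      obtain ⟨x, hx, hxb⟩ := hall
      have hpos : 0 < ((seq.drop i.toNat).take L.toNat).countP pvInvalid :=
        List.countP_pos_iff.mpr ⟨x, hx, by simp [pvInvalid, hxb]⟩
      symm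
      simp only [beq_eq_false_iff_ne, ne_eq]
      omega
  · rw [hslice, PySem.Str.len_eq, String.toList_ofList, hwlen]
    omega

-- ===== VERDICT (by name: the statement is the Claim_ definition above) =====
theorem extract_bgd_signals_spec : Claim_equal_extract_bgd_signals := by
  intro whole_seq signal_ulen signal_dlen site_type target_signals excluding _dom
  unfold Spec_extract_bgd_signals extract_bgd_signals extract_bgd_signals_alt
  by_cases hL : signal_ulen + signal_dlen < 0
  · rw [if_pos hL]
    -- A appends only under check_signal, which is false for a negative required length
    rw [PySem.List.foldl_congr_mem _ _ (fun acc _ => acc) []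
      (by
        intro acc i _
        simp only
        rw [check_signal_of_neg _ _ hL]
        split_ifs <;> simp_all)]
    simp
  · rw [if_neg hL]
    rw [Int.not_lt] at hL
    have hlen : (PySem.Chars.lower whole_seq.toList).length = whole_seq.toList.length := by
      simp [PySem.Chars.lower]
    rw [PySem.Str.len_eq, ← hlen]
    apply PySem.List.foldl_congr_mem
    intro acc i hi
    rw [PySem.List.mem_pyRange_one] at hi
    obtain ⟨hi0, hiN⟩ := hi
    simp only
    rw [lower_slice_comm whole_seq.toList i (i + (signal_ulen + signal_dlen)) hi0 (by omega)]
    rw [set_ofList_contains]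
    rw [check_eq_bad (PySem.Chars.lower whole_seq.toList) i (signal_ulen + signal_dlen) hi0 hL
      (by omega)]
    by_cases hd : site_type = "donor" <;> by_cases he : excluding <;>
      simp [hd, he]
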